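-- pv_equiv track=rewrite | github.com/Lavanyashankar09/InformationRetreival | hw3/hw3-part1.py | stepped
-- ===== SOURCE A (Python) =====
-- def index_ambiguous(sentence):
--     for i, word in enumerate(sentence):
--         if len(word) > 3 and word.startswith(".X-"):
--             return i
--     return -1
--
-- def uniform(sentence):
--     return [1] * len(sentence)
--
-- def stepped(sentence):
--     weights = []
--     pos_amb = index_ambiguous(sentence)
--
--     if pos_amb == -1:
--         return uniform(sentence)
--
--     for i in range(len(sentence)):
--         dist = abs(pos_amb - i)
--         if dist == 0:
--             weights.append(0)
--         elif dist == 1: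
--             weights.append(6)
--         elif 2 <= dist <= 3:
--             weights.append(3)
--         else:
--             weights.append(1)
--
--     return weights
-- ===== SOURCE B (Python) =====
-- def stepped(sentence):
--     n = len(sentence)
--     pos = next((i for i, w in enumerate(sentence)
--                 if len(w) > 3 and w.startswith(".X-")), -1)
--     if pos == -1:
--         return [1] * n
--     weights = [1] * n
--     weights[pos] = 0
--     for off, w in ((-1, 6), (1, 6), (-2, 3), (2, 3), (-3, 3), (3, 3)):
--         idx = pos + off
--         if 0 <= idx < n:
--             weights[idx] = w
--     return weights
-- ===== Notes on version B (the rewrite author's own statement) =====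
-- stated objective: alternative
-- what changed: Instead of recomputing abs(pos-i) and selecting a weight for every index, B starts from the uniform [1]*n list and patches only the anchor position and its six bounds-checked neighbours.
import Mathlib
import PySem

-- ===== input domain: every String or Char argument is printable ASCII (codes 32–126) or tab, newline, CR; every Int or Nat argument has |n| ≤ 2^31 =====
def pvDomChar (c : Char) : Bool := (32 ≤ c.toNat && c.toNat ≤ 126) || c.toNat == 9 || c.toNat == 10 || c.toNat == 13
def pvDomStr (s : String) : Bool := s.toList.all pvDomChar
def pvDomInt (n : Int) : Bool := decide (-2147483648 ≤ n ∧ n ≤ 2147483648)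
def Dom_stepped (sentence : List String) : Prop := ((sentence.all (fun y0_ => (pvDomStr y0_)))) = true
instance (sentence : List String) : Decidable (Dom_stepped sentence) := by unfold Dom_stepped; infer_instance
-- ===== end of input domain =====

-- B starts from the uniform list and patches the anchor neighbourhood (bounds-checked), instead of computing abs-distance for every index; alternative decomposition, same cost.

-- ===== PORT A =====
-- for i, word in enumerate(sentence): return i on the first ambiguous word, else -1
def pvAmbGo : List String → Nat → Int
  | [], _ => -1
  | w :: rest, i =>
    if PySem.Str.len w > 3 ∧ PySem.Str.startswith w ".X-" then (i : Int)
    else pvAmbGo rest (i + 1)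

def index_ambiguous (sentence : List String) : Int := pvAmbGo sentence 0

def uniform (sentence : List String) : List Int := List.replicate sentence.length 1

def stepped (sentence : List String) : List Int :=
  let pos_amb := index_ambiguous sentence
  if pos_amb = -1 then uniform sentence
  else
    (PySem.List.pyRange 0 sentence.length 1).foldl
      (fun weights i =>
        let dist := (pos_amb - i).natAbs
        weights ++
          [if dist = 0 then (0 : Int)
           else if dist = 1 then 6
           else if 2 ≤ dist ∧ dist ≤ 3 then 3
           else 1])
      []

-- ===== PORT B =====
-- pos = next((i for i, w in enumerate(sentence) if len(w) > 3 and w.startswith(".X-")), -1)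
def pvFindAmb : List String → Nat → Int
  | [], _ => -1
  | w :: rest, i =>
    if PySem.Str.len w > 3 ∧ PySem.Str.startswith w ".X-" then (i : Int)
    else pvFindAmb rest (i + 1)

def stepped_alt (sentence : List String) : List Int :=
  let n : Int := sentence.length
  let pos := pvFindAmb sentence 0
  if pos = -1 then List.replicate sentence.length (1 : Int)
  else
    [((-1 : Int), (6 : Int)), (1, 6), (-2, 3), (2, 3), (-3, 3), (3, 3)].foldl
      (fun weights ow =>
        let idx := pos + ow.1
        if 0 ≤ idx ∧ idx < n then PySem.List.pySetD weights idx ow.2 else weights)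
      (PySem.List.pySetD (List.replicate sentence.length (1 : Int)) pos 0)

-- ===== PRECONDITION & SPEC =====
def Spec_stepped (sentence : List String) (out : List Int) : Prop := out = stepped_alt sentence
instance (sentence : List String) (out : List Int) : Decidable (Spec_stepped sentence out) := by unfold Spec_stepped; infer_instance

-- ===== CLAIM (what is proved, stated in full; the proofs are below) =====
def Claim_equal_stepped : Prop := ∀ (sentence : List String), Dom_stepped sentence → Spec_stepped sentence (stepped sentence)

-- ===== LEMMAS AND PROOFS =====

-- A's per-index weight (the zeta-reduced loop body of A), named for the proofs
def pvW (pos i : Int) : Int :=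
  if (pos - i).natAbs = 0 then 0
  else if (pos - i).natAbs = 1 then 6
  else if 2 ≤ (pos - i).natAbs ∧ (pos - i).natAbs ≤ 3 then 3
  else 1

-- the body of B's patch loop, named for the proofs
def pvStep (pos : Int) (n : Int) (ws : List Int) (ow : Int × Int) : List Int :=
  if 0 ≤ pos + ow.1 ∧ pos + ow.1 < n then PySem.List.pySetD ws (pos + ow.1) ow.2 else ws

def pvPairs : List (Int × Int) := [((-1 : Int), (6 : Int)), (1, 6), (-2, 3), (2, 3), (-3, 3), (3, 3)]

lemma stepped_eq (s : List String) :
    stepped s =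
      if index_ambiguous s = -1 then List.replicate s.length (1 : Int)
      else (PySem.List.pyRange 0 s.length 1).foldl
        (fun ws i => ws ++ [pvW (index_ambiguous s) i]) [] := rfl

lemma stepped_alt_eq (s : List String) :
    stepped_alt s =
      if pvFindAmb s 0 = -1 then List.replicate s.length (1 : Int)
      else pvPairs.foldl (pvStep (pvFindAmb s 0) (s.length : Int))
        (PySem.List.pySetD (List.replicate s.length (1 : Int)) (pvFindAmb s 0) 0) := rfl

lemma pvFindAmb_eq (xs : List String) : ∀ i, pvFindAmb xs i = pvAmbGo xs i := by
  induction xs with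
  | nil => intro i; rfl
  | cons w rest ih =>
    intro i
    simp only [pvFindAmb, pvAmbGo, ih]

lemma pvAmbGo_bounds (xs : List String) : ∀ i : Nat,
    pvAmbGo xs i = -1 ∨ ((i : Int) ≤ pvAmbGo xs i ∧ pvAmbGo xs i < (i : Int) + xs.length) := by
  induction xs with
  | nil => intro i; left; rfl
  | cons w rest ih =>
    intro i
    simp only [pvAmbGo, List.length_cons]
    split
    · right; constructor <;> simp
    · rcases ih (i + 1) with h | h
      · left; exact h
      · right
        push_cast at h ⊢
        omega

lemma pvStep_length (pos n : Int) (ws : List Int) (ow : Int × Int) :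
    (pvStep pos n ws ow).length = ws.length := by
  unfold pvStep
  split <;> simp [PySem.List.length_pySetD]

lemma pvStep_getD (pos : Int) (n : Nat) (ws : List Int) (hlen : ws.length = n)
    (ow : Int × Int) (j : Nat) (hj : j < n) :
    (pvStep pos (n : Int) ws ow).getD j 0 =
      if pos + ow.1 = (j : Int) then ow.2 else ws.getD j 0 := by
  unfold pvStep
  split_ifs with hc he he
  · rw [PySem.List.pySetD_of_nonneg _ _ hc.1,
        List.getD_eq_getElem _ _ (by simp [hlen]; exact hj), List.getElem_set,
        if_pos (by omega)]
  · rw [PySem.List.pySetD_of_nonneg _ _ hc.1,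
        List.getD_eq_getElem _ _ (by simp [hlen]; exact hj), List.getElem_set,
        if_neg (by omega), List.getD_eq_getElem _ _ (show j < ws.length by omega)]
  · omega
  · rfl

lemma pvWs0_getD (n : Nat) (pos : Int) (h0 : 0 ≤ pos)
    (j : Nat) (hj : j < n) :
    (PySem.List.pySetD (List.replicate n (1 : Int)) pos 0).getD j 0 =
      if pos = (j : Int) then 0 else 1 := by
  rw [PySem.List.pySetD_of_nonneg _ _ h0]
  rw [List.getD_eq_getElem _ _ (by simp; exact hj), List.getElem_set]
  split_ifs with h1 h2 h2
  · rfl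
  · omega
  · omega
  · simp

lemma stepped_getD (sentence : List String)
    (hne : ¬ index_ambiguous sentence = -1) (j : Nat)
    (hj : j < sentence.length) :
    (stepped sentence).getD j 0 = pvW (index_ambiguous sentence) j := by
  rw [stepped_eq, if_neg hne]
  rw [PySem.List.foldl_append_singleton_eq_map, PySem.List.pyRange_one, List.map_map,
      List.nil_append]
  rw [List.getD_eq_getElem _ _ (by simpa using hj)]
  simp

lemma stepped_alt_getD (sentence : List String)
    (hne : ¬ pvFindAmb sentence 0 = -1)
    (h0 : 0 ≤ pvFindAmb sentence 0) (j : Nat)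
    (hj : j < sentence.length) :
    (stepped_alt sentence).getD j 0 =
      (if pvFindAmb sentence 0 + 3 = (j : Int) then (3 : Int)
       else if pvFindAmb sentence 0 + -3 = (j : Int) then 3
       else if pvFindAmb sentence 0 + 2 = (j : Int) then 3
       else if pvFindAmb sentence 0 + -2 = (j : Int) then 3
       else if pvFindAmb sentence 0 + 1 = (j : Int) then 6
       else if pvFindAmb sentence 0 + -1 = (j : Int) then 6
       else if pvFindAmb sentence 0 = (j : Int) then 0
       else 1) := by
  rw [stepped_alt_eq, if_neg hne]
  set pos := pvFindAmb sentence 0 with hp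
  simp only [pvPairs, List.foldl_cons, List.foldl_nil]
  set ws0 := PySem.List.pySetD (List.replicate sentence.length (1 : Int)) pos 0 with hws0
  have l0 : ws0.length = sentence.length := by
    rw [hws0, PySem.List.length_pySetD, List.length_replicate]
  have l1 := pvStep_length pos (sentence.length : Int) ws0 ((-1 : Int), (6 : Int))
  set w1 := pvStep pos (sentence.length : Int) ws0 ((-1 : Int), (6 : Int)) with hw1
  have l2 := pvStep_length pos (sentence.length : Int) w1 ((1 : Int), (6 : Int))
  set w2 := pvStep pos (sentence.length : Int) w1 ((1 : Int), (6 : Int)) with hw2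
  have l3 := pvStep_length pos (sentence.length : Int) w2 ((-2 : Int), (3 : Int))
  set w3 := pvStep pos (sentence.length : Int) w2 ((-2 : Int), (3 : Int)) with hw3
  have l4 := pvStep_length pos (sentence.length : Int) w3 ((2 : Int), (3 : Int))
  set w4 := pvStep pos (sentence.length : Int) w3 ((2 : Int), (3 : Int)) with hw4
  have l5 := pvStep_length pos (sentence.length : Int) w4 ((-3 : Int), (3 : Int))
  set w5 := pvStep pos (sentence.length : Int) w4 ((-3 : Int), (3 : Int)) with hw5
  rw [pvStep_getD pos sentence.length w5 (by omega) ((3 : Int), (3 : Int)) j hj,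
      hw5, pvStep_getD pos sentence.length w4 (by omega) ((-3 : Int), (3 : Int)) j hj,
      hw4, pvStep_getD pos sentence.length w3 (by omega) ((2 : Int), (3 : Int)) j hj,
      hw3, pvStep_getD pos sentence.length w2 (by omega) ((-2 : Int), (3 : Int)) j hj,
      hw2, pvStep_getD pos sentence.length w1 (by omega) ((1 : Int), (6 : Int)) j hj,
      hw1, pvStep_getD pos sentence.length ws0 l0 ((-1 : Int), (6 : Int)) j hj,
      hws0, pvWs0_getD sentence.length pos h0 j hj]

lemma stepped_length (sentence : List String) :
    (stepped sentence).length = sentence.length := by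
  rw [stepped_eq]
  split
  · simp
  · rw [PySem.List.foldl_append_singleton_eq_map, List.nil_append, List.length_map,
        PySem.List.length_pyRange_one]
    simp

lemma stepped_alt_length (sentence : List String) :
    (stepped_alt sentence).length = sentence.length := by
  rw [stepped_alt_eq]
  split
  · simp
  · simp only [pvPairs, List.foldl_cons, List.foldl_nil]
    simp [pvStep_length, PySem.List.length_pySetD]

-- ===== VERDICT (by name: the statement is the Claim_ definition above) =====
theorem stepped_spec : Claim_equal_stepped := by
  intro sentence _
  unfold Spec_stepped
  by_cases hne : index_ambiguous sentence = -1
  · rw [stepped_eq, stepped_alt_eq, pvFindAmb_eq]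
    simp only [index_ambiguous] at hne ⊢
    rw [if_pos hne, if_pos hne]
  · have hb := pvAmbGo_bounds sentence 0
    have hfa : pvFindAmb sentence 0 = pvAmbGo sentence 0 := pvFindAmb_eq sentence 0
    simp only [index_ambiguous] at hne
    rcases hb with h | h
    · exact absurd h hne
    · apply List.ext_getElem
      · rw [stepped_length, stepped_alt_length]
      · intro j hj1 hj2
        have hjlen : j < sentence.length := by
          rw [stepped_length] at hj1; exact hj1
        rw [← List.getD_eq_getElem _ 0 hj1, ← List.getD_eq_getElem _ 0 hj2]
        rw [stepped_getD sentence hne j hjlen,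
            stepped_alt_getD sentence (by rw [hfa]; exact hne) (by rw [hfa]; exact h.1)
              j hjlen]
        simp only [index_ambiguous, hfa, pvW]
        split_ifs <;> omega
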